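-- pv_equiv track=rewrite | github.com/Ivareh/DB-project | read_from_files_needed.py | inverse_area_with_rows
-- ===== SOURCE A (Python) =====
-- def has_numbers(inputString: str):
--     return any(char.isdigit() for char in inputString)
--
-- def inverse_area_with_rows(lines):
--     areas_with_rows = []
--
--     # Create sublists of the lines into areas with rows
--     for area_row in lines:
--         if not has_numbers(area_row):
--             areas_with_rows.append([area_row])
--         else:
--             areas_with_rows[-1].append(area_row)
--
--     # Iterate through the areas with rows and reverse the order of the rows
--     for index, area_with_row in enumerate(areas_with_rows):
--         area = area_with_row[0]
--         area_with_row = area_with_row[1:][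
--             ::-1
--         ]  # Reverse the order of the rows except the first row (area)
--         areas_with_rows[index] = [
--             area
--         ] + area_with_row  # Add the area to the beginning of the list
--     # Flatten the list of areas with rows to original format
--     flatten_areas_with_rows = [row for area_row in areas_with_rows for row in area_row]
--     return flatten_areas_with_rows
-- ===== SOURCE B (Python) =====
-- def inverse_area_with_rows(lines):
--     result = []
--     header = None
--     rows = []
--     for line in lines:
--         if any(ch.isdigit() for ch in line):
--             rows.append(line)
--         else:
--             if header is not None:
--                 result.append(header)
--             result.extend(reversed(rows))
--             header = line
--             rows = []
--     if header is not None: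
--         result.append(header)
--     result.extend(reversed(rows))
--     return result
-- ===== Notes on version B (the rewrite author's own statement) =====
-- stated objective: simpler
-- what changed: Replaces A's three phases (build nested group lists by appending to the last group, then rewrite each group in place with a reversed slice, then flatten) with a single streaming pass keeping a result list, the current header and a row buffer, flushing header + reversed rows at each new header and at the end.
-- crash fix: When the first line contains a digit A raises IndexError (areas_with_rows[-1] on an empty list); B returns those leading header-less rows reversed followed by the remaining groups. — e.g. on inverse_area_with_rows(["1"]): A raises IndexError, B returns ["1"]
import Mathlib
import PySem

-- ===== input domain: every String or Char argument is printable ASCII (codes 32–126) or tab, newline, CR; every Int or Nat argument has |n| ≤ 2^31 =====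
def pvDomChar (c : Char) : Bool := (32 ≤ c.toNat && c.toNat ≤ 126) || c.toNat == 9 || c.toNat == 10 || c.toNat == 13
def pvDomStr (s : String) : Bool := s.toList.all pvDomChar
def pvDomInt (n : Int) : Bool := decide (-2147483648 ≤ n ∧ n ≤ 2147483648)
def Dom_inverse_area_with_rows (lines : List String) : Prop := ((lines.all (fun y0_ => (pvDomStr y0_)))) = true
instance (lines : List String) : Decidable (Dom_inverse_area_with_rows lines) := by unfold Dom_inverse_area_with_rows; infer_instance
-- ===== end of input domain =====

-- B replaces A's build-groups / reverse-in-place / flatten with one streaming pass (header + rows buffer); same return value wherever A returns.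

-- ===== PORT A =====
-- any(char.isdigit() for char in s)
def pvHasNumbers (s : String) : Bool := s.toList.any (fun c => PySem.Chars.isdigit c)

-- areas_with_rows[-1].append(x); on [] Python raises IndexError (excluded by Pre_, port returns [])
def pvAppendLast : List (List String) → String → List (List String)
  | [], _ => []
  | [g], x => [g ++ [x]]
  | g :: gs, x => g :: pvAppendLast gs x

-- the body of A's first loop
def pvGroupStep (acc : List (List String)) (l : String) : List (List String) :=
  if !(pvHasNumbers l) then acc ++ [[l]] else pvAppendLast acc l

-- areas_with_rows[index] = [area_with_row[0]] + area_with_row[1:][::-1]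
-- ([::-1] is reverse, PySem.List.slice?_none_none_neg_one); g = [] is unreachable (phase-1 groups are nonempty)
def pvFix (g : List String) : List String :=
  match g with
  | [] => []
  | a :: _ => a :: (PySem.List.slice g (some 1) none).reverse

def inverse_area_with_rows (lines : List String) : List String :=
  ((lines.foldl pvGroupStep []).map pvFix).flatten

-- ===== PORT B =====
-- the streaming loop of Source B: (result, header, rows) state; flush = result + [header]? + reversed rows
def pvLoopB : List String → List String → Option String → List String → List String
  | [], res, hd, rows => res ++ (match hd with | some h => [h] | none => []) ++ rows.reverse
  | l :: ls, res, hd, rows =>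
    if pvHasNumbers l then pvLoopB ls res hd (rows ++ [l])
    else pvLoopB ls (res ++ (match hd with | some h => [h] | none => []) ++ rows.reverse) (some l) []

def inverse_area_with_rows_alt (lines : List String) : List String :=
  pvLoopB lines [] none []

-- ===== PRECONDITION & SPEC =====
-- Pre_ excludes exactly the inputs where A raises IndexError: a first line containing a digit
-- (areas_with_rows[-1] on the empty list).
def Pre_inverse_area_with_rows (lines : List String) : Prop :=
  pvHasNumbers (lines.headD "") = false
instance (lines : List String) : Decidable (Pre_inverse_area_with_rows lines) := by unfold Pre_inverse_area_with_rows; infer_instance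
def pvWitness_inverse_area_with_rows : List String := ["area a", "1", "2", "area b", "3"]

-- A raises IndexError when the first line contains a digit; B groups those leading rows without a header and returns them reversed.
def Raises_inverse_area_with_rows (lines : List String) : Prop :=
  pvHasNumbers (lines.headD "") = true
instance (lines : List String) : Decidable (Raises_inverse_area_with_rows lines) := by unfold Raises_inverse_area_with_rows; infer_instance
def pvRaiseWitness_inverse_area_with_rows : List String := ["1"]
def pvRaiseWitnessOut_inverse_area_with_rows : List String := ["1"]

def Spec_inverse_area_with_rows (lines : List String) (out : List String) : Prop := out = inverse_area_with_rows_alt lines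
instance (lines : List String) (out : List String) : Decidable (Spec_inverse_area_with_rows lines out) := by unfold Spec_inverse_area_with_rows; infer_instance

-- ===== CLAIM (what is proved, stated in full; the proofs are below) =====
def Claim_equal_inverse_area_with_rows : Prop := ∀ (lines : List String), Dom_inverse_area_with_rows lines → Pre_inverse_area_with_rows lines → Spec_inverse_area_with_rows lines (inverse_area_with_rows lines)
def Claim_raises_inverse_area_with_rows : Prop := (∀ (lines : List String), Dom_inverse_area_with_rows lines → Raises_inverse_area_with_rows lines → ¬ Pre_inverse_area_with_rows lines) ∧ (Dom_inverse_area_with_rows (pvRaiseWitness_inverse_area_with_rows) ∧ Raises_inverse_area_with_rows (pvRaiseWitness_inverse_area_with_rows) ∧ inverse_area_with_rows_alt (pvRaiseWitness_inverse_area_with_rows) = pvRaiseWitnessOut_inverse_area_with_rows)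

-- ===== LEMMAS AND PROOFS =====

theorem pvAppendLast_cons_ne (g : List String) (t : List (List String)) (ht : t ≠ []) (x : String) :
    pvAppendLast (g :: t) x = g :: pvAppendLast t x := by
  cases t with
  | nil => exact absurd rfl ht
  | cons a b => rfl

theorem pvAppendLast_append (G H : List (List String)) (hH : H ≠ []) (x : String) :
    pvAppendLast (G ++ H) x = G ++ pvAppendLast H x := by
  induction G with
  | nil => rfl
  | cons g gs ih =>
      have hne : gs ++ H ≠ [] := by
        intro h; exact hH (List.eq_nil_of_append_eq_nil h).2
      simp only [List.cons_append, pvAppendLast_cons_ne _ _ hne, ih]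

theorem pvAppendLast_ne_nil (H : List (List String)) (hH : H ≠ []) (x : String) :
    pvAppendLast H x ≠ [] := by
  cases H with
  | nil => exact absurd rfl hH
  | cons g t =>
      cases t with
      | nil => simp [pvAppendLast]
      | cons a b => simp [pvAppendLast]

theorem pvGroupStep_ne_nil (H : List (List String)) (hH : H ≠ []) (l : String) :
    pvGroupStep H l ≠ [] := by
  unfold pvGroupStep
  split
  · simp
  · exact pvAppendLast_ne_nil H hH l

theorem foldl_groupStep_append (ls : List String) :
    ∀ (G H : List (List String)), H ≠ [] →
      List.foldl pvGroupStep (G ++ H) ls = G ++ List.foldl pvGroupStep H ls := by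
  induction ls with
  | nil => intro G H _; rfl
  | cons l ls ih =>
      intro G H hH
      simp only [List.foldl_cons]
      by_cases hd : pvHasNumbers l
      · have : pvGroupStep (G ++ H) l = G ++ pvGroupStep H l := by
          simp [pvGroupStep, hd, pvAppendLast_append G H hH]
        rw [this, ih G (pvGroupStep H l) (pvGroupStep_ne_nil H hH l)]
      · have : pvGroupStep (G ++ H) l = G ++ (H ++ [[l]]) := by
          simp [pvGroupStep, hd]
        rw [this, ih G (H ++ [[l]]) (by simp)]
        simp [pvGroupStep, hd]

theorem pvFix_cons (h : String) (rs : List String) :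
    pvFix (h :: rs) = h :: rs.reverse := by
  simp [pvFix, PySem.List.slice_from_one]

theorem pvLoopB_eq (ls : List String) :
    ∀ (res : List String) (h : String) (rs : List String),
      pvLoopB ls res (some h) rs
        = res ++ ((List.foldl pvGroupStep [h :: rs] ls).map pvFix).flatten := by
  induction ls with
  | nil =>
      intro res h rs
      simp [pvLoopB, pvFix_cons]
  | cons l ls ih =>
      intro res h rs
      by_cases hd : pvHasNumbers l
      · have hstep : pvGroupStep [h :: rs] l = [h :: (rs ++ [l])] := by
          simp [pvGroupStep, hd, pvAppendLast]
        simp only [pvLoopB, hd, if_pos, List.foldl_cons, hstep, ih]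
      · have hstep : pvGroupStep [h :: rs] l = [h :: rs] ++ [[l]] := by
          simp [pvGroupStep, hd]
        simp only [pvLoopB, hd, Bool.false_eq_true, if_neg, not_false_iff, List.foldl_cons, hstep]
        rw [foldl_groupStep_append ls [h :: rs] [[l]] (by simp), ih]
        simp [pvFix_cons]

-- ===== VERDICT (by name: the statement is the Claim_ definition above) =====
theorem inverse_area_with_rows_spec : Claim_equal_inverse_area_with_rows := by
  intro lines _ hpre
  unfold Spec_inverse_area_with_rows
  cases lines with
  | nil => rfl
  | cons l ls =>
      have hd : pvHasNumbers l = false := hpre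
      show _ = pvLoopB (l :: ls) [] none []
      have : pvLoopB (l :: ls) [] none [] = pvLoopB ls [] (some l) [] := by
        simp [pvLoopB, hd]
      rw [this, pvLoopB_eq ls [] l []]
      simp [inverse_area_with_rows, pvGroupStep, hd]

@[simp] theorem inverse_area_with_rows_raises : Claim_raises_inverse_area_with_rows := by
  unfold Claim_raises_inverse_area_with_rows
  refine ⟨?_, by decide⟩
  intro lines _ hr hp
  unfold Pre_inverse_area_with_rows at hp
  unfold Raises_inverse_area_with_rows at hr
  rw [List.headD_eq_head?_getD] at hr hp
  simp [hr] at hp
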